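-- pv_equiv track=rewrite | github.com/alvarognnzz/skibidi-lang | tokenizer.py | identify_string
-- ===== SOURCE A (Python) =====
-- def identify_string(tokens):
--     string = ""
--     has_char = False
--
--     copied_tokens = tokens.copy()
--
--     while copied_tokens and (copied_tokens[0].startswith("CHAR:") or copied_tokens[0].startswith("INT:")):
--         if copied_tokens[0].startswith("CHAR:"):
--             has_char = True
--         string += copied_tokens.pop(0).split(":")[1]
--
--     return string if has_char else ""
-- ===== SOURCE B (Python) =====
-- from itertools import takewhile
--
-- def identify_string(tokens):
--     prefix = list(takewhile(lambda t: t.startswith("CHAR:") or t.startswith("INT:"), tokens))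
--     has_char = any(t.startswith("CHAR:") for t in prefix)
--     return "".join(t.split(":")[1] for t in prefix) if has_char else ""
-- ===== Notes on version B (the rewrite author's own statement) =====
-- stated objective: alternative
-- what changed: Replaces the fused while-loop that copies the list and repeatedly pops index 0 while maintaining a flag and an accumulator with a takeWhile prefix extraction followed by two independent reductions (any for the CHAR flag, join for the concatenation).
import Mathlib
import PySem

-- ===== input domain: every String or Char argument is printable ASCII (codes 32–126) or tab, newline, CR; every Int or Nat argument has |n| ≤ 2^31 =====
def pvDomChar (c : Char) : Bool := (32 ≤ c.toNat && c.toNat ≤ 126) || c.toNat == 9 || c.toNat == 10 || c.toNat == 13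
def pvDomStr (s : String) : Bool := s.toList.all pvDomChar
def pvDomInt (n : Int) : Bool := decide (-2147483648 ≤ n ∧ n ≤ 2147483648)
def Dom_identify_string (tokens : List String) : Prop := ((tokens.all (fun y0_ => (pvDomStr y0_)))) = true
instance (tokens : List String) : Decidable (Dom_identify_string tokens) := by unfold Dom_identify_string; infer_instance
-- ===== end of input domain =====

-- B replaces A's fused while-loop (list copy + repeated pop(0) with a flag and an accumulator)
-- by a takeWhile prefix extraction followed by two separate reductions (any + join): an alternative decomposition.


-- ===== PORT A =====
-- t.split(":")[1]; inside the loop t starts with "CHAR:" or "INT:", so the split always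
-- has a second piece and the `.getD` defaults are never reached (Python would raise IndexError there).
def pvPayloadA (t : String) : String :=
  (PySem.List.pyGet? ((PySem.Str.split? t ":").getD []) 1).getD ""

-- the while-loop over copied_tokens with accumulators string / has_char (pop(0) = structural recursion)
def pvLoopA : List String → String → Bool → String
  | [], string, has_char => if has_char then string else ""
  | t :: rest, string, has_char =>
    if PySem.Str.startswith t "CHAR:" || PySem.Str.startswith t "INT:" then
      pvLoopA rest (string ++ pvPayloadA t)
        (if PySem.Str.startswith t "CHAR:" then true else has_char)
    else
      if has_char then string else ""

def identify_string (tokens : List String) : String := pvLoopA tokens "" false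

-- ===== PORT B =====
def pvPredB (t : String) : Bool :=
  PySem.Str.startswith t "CHAR:" || PySem.Str.startswith t "INT:"

-- t.split(":")[1] as in Source B (second piece always exists on the takeWhile prefix)
def pvPayloadB (t : String) : String :=
  (PySem.List.pyGet? ((PySem.Str.split? t ":").getD []) 1).getD ""

def identify_string_alt (tokens : List String) : String :=
  let pref := tokens.takeWhile pvPredB
  let has_char := pref.any (fun t => PySem.Str.startswith t "CHAR:")
  if has_char then PySem.Str.join "" (pref.map pvPayloadB) else ""

-- ===== PRECONDITION & SPEC =====
def Spec_identify_string (tokens : List String) (out : String) : Prop := out = identify_string_alt tokens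
instance (tokens : List String) (out : String) : Decidable (Spec_identify_string tokens out) := by unfold Spec_identify_string; infer_instance

-- ===== CLAIM (what is proved, stated in full; the proofs are below) =====
def Claim_equal_identify_string : Prop := ∀ (tokens : List String), Dom_identify_string tokens → Spec_identify_string tokens (identify_string tokens)

-- ===== LEMMAS AND PROOFS =====
theorem pvJoin_cons (x : String) (xs : List String) :
    PySem.Str.join "" (x :: xs) = x ++ PySem.Str.join "" xs := by
  cases xs <;> simp [PySem.Str.join, PySem.Chars.join_cons_cons, String.ofList_append]

theorem pvLoopA_eq (l : List String) (s : String) (hc : Bool) :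
    pvLoopA l s hc =
      (if (hc || (l.takeWhile pvPredB).any (fun t => PySem.Str.startswith t "CHAR:")) then
        s ++ PySem.Str.join "" ((l.takeWhile pvPredB).map pvPayloadB) else "") := by
  induction l generalizing s hc with
  | nil => cases hc <;> simp [pvLoopA, PySem.Str.join]
  | cons t rest ih =>
    by_cases hp : pvPredB t = true
    · have hpay : pvPayloadA t = pvPayloadB t := rfl
      simp only [pvLoopA, pvPredB] at hp ⊢
      rw [hp, if_pos rfl, ih, List.takeWhile_cons, pvPredB, hp]
      simp only [hpay]
      cases hA : PySem.Str.startswith t "CHAR:" <;> cases hc <;>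
        simp only [PySem.Str.startswith_eq,
          show "CHAR:".toList = ['C','H','A','R',':'] from rfl] at hA <;>
        simp [hA, pvJoin_cons, String.append_assoc]
    · simp only [pvPredB] at hp
      simp only [pvLoopA, List.takeWhile_cons, pvPredB, hp]
      cases hc <;> simp [PySem.Str.join]

-- ===== VERDICT (by name: the statement is the Claim_ definition above) =====
theorem identify_string_spec : Claim_equal_identify_string := by
  intro tokens _
  unfold Spec_identify_string identify_string identify_string_alt
  rw [pvLoopA_eq]
  simp
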